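-- pv_equiv track=rewrite | github.com/Ratneshtr-code/data_extractor | merge_json_to_csv.py | validate_question_format
-- ===== SOURCE A (Python) =====
-- from typing import List, Dict, Any, Optional, Tuple
--
-- def validate_question_format(question: Dict[str, Any]) -> Tuple[bool, Optional[str]]:
--     """
--     Validate if question structure matches its declared format type.
--
--     Returns:
--         (is_valid, warning_message)
--     """
--     question_text = str(question.get("question", "")).lower()
--     declared_format = str(question.get("format", "single")).lower()
--
--     warnings = []
--
--     # Check for format-specific patterns
--     if declared_format == "match":
--         # Match questions should contain "match" or pairing indicators
--         if "match" not in question_text and "row" not in question_text: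
--             warnings.append("Match format declared but question doesn't contain match/pairing indicators")
--     elif declared_format == "statement":
--         # Statement questions should contain "statement" or "consider the following"
--         if "statement" not in question_text and "consider the following" not in question_text:
--             warnings.append("Statement format declared but question doesn't contain statement indicators")
--     elif declared_format == "assertion":
--         # Assertion-Reason questions should contain assertion/reason indicators
--         assertion_keywords = ["assertion", "reason", "statement i", "statement ii", "assertion (a)", "reason (r)"]
--         if not any(keyword in question_text for keyword in assertion_keywords):
--             warnings.append("Assertion format declared but question doesn't contain assertion/reason indicators")
--     elif declared_format == "table":
--         # Table questions should contain table indicators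
--         if "table" not in question_text and "row" not in question_text and "column" not in question_text:
--             warnings.append("Table format declared but question doesn't contain table indicators")
--     elif declared_format == "paragraph":
--         # Paragraph questions should be longer
--         if len(question_text) < 100:
--             warnings.append("Paragraph format declared but question seems too short")
--
--     if warnings:
--         return False, "; ".join(warnings)
--
--     return True, None
-- ===== SOURCE B (Python) =====
-- _FLAT = [
--     ("match", "match"), ("match", "row"),
--     ("statement", "statement"), ("statement", "consider the following"),
--     ("assertion", "assertion"), ("assertion", "reason"),
--     ("assertion", "statement i"), ("assertion", "statement ii"),
--     ("assertion", "assertion (a)"), ("assertion", "reason (r)"),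
--     ("table", "table"), ("table", "row"), ("table", "column"),
-- ]
-- _MSG = {
--     "match": "Match format declared but question doesn't contain match/pairing indicators",
--     "statement": "Statement format declared but question doesn't contain statement indicators",
--     "assertion": "Assertion format declared but question doesn't contain assertion/reason indicators",
--     "table": "Table format declared but question doesn't contain table indicators",
-- }
--
--
-- def validate_question_format(question):
--     text = str(question.get("question", "")).lower()
--     fmt = str(question.get("format", "single")).lower()
--     # One pass over the flat keyword table: which formats does this text satisfy?
--     satisfied = {f for f, k in _FLAT if k in text}
--     if fmt == "paragraph":
--         if len(text) < 100:
--             return False, "Paragraph format declared but question seems too short"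
--         return True, None
--     if fmt in _MSG and fmt not in satisfied:
--         return False, _MSG[fmt]
--     return True, None
-- ===== Notes on version B (the rewrite author's own statement) =====
-- stated objective: alternative
-- what changed: B first makes one pass over a flat (format, keyword) table computing the SET of all formats the text satisfies, then decides validity by a single set-membership test of the declared format (plus the separate paragraph length check), instead of A's per-format branch chain with its warnings-list/join bookkeeping.
import Mathlib
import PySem

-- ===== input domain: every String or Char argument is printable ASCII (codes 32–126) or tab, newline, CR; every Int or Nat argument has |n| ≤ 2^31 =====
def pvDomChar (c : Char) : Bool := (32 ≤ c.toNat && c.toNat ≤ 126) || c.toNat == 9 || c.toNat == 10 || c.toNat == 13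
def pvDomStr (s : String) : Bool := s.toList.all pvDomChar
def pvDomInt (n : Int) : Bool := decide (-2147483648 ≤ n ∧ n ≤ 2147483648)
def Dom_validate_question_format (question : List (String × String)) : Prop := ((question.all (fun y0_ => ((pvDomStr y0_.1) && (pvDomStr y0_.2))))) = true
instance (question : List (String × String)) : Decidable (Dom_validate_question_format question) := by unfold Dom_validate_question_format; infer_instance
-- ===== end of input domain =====

-- B computes the set of all formats the text satisfies in one pass over a flat
-- (format, keyword) table, then tests the declared format by set membership
-- (objective: alternative decomposition; return values identical to A's).

-- ===== PORT A =====
-- Transliteration of A: if/elif chain on the declared format, a warnings list, '; '.join at the end.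
def validate_question_format (question : List (String × String)) : Bool × Option String :=
  let question_text := PySem.Str.lower ((PySem.Dict.mk question).getD "question" "")
  let declared_format := PySem.Str.lower ((PySem.Dict.mk question).getD "format" "single")
  let warnings : List String :=
    if declared_format == "match" then
      if !PySem.Str.isIn "match" question_text && !PySem.Str.isIn "row" question_text then
        [] ++ ["Match format declared but question doesn't contain match/pairing indicators"]
      else []
    else if declared_format == "statement" then
      if !PySem.Str.isIn "statement" question_text && !PySem.Str.isIn "consider the following" question_text then
        [] ++ ["Statement format declared but question doesn't contain statement indicators"]
      else []
    else if declared_format == "assertion" then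
      let assertion_keywords := ["assertion", "reason", "statement i", "statement ii", "assertion (a)", "reason (r)"]
      if !(assertion_keywords.any (fun keyword => PySem.Str.isIn keyword question_text)) then
        [] ++ ["Assertion format declared but question doesn't contain assertion/reason indicators"]
      else []
    else if declared_format == "table" then
      if !PySem.Str.isIn "table" question_text && !PySem.Str.isIn "row" question_text
          && !PySem.Str.isIn "column" question_text then
        [] ++ ["Table format declared but question doesn't contain table indicators"]
      else []
    else if declared_format == "paragraph" then
      if PySem.Str.len question_text < 100 then
        [] ++ ["Paragraph format declared but question seems too short"]
      else []
    else []
  if warnings ≠ [] then (false, some (PySem.Str.join "; " warnings)) else (true, none)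

-- ===== PORT B =====
-- B's flat (format, keyword) table
def pvFlat : List (String × String) :=
  [ ("match", "match"), ("match", "row"),
    ("statement", "statement"), ("statement", "consider the following"),
    ("assertion", "assertion"), ("assertion", "reason"),
    ("assertion", "statement i"), ("assertion", "statement ii"),
    ("assertion", "assertion (a)"), ("assertion", "reason (r)"),
    ("table", "table"), ("table", "row"), ("table", "column") ]

-- B's message table
def pvMsgs : PySem.Dict String String := PySem.Dict.mk
  [ ("match", "Match format declared but question doesn't contain match/pairing indicators"),
    ("statement", "Statement format declared but question doesn't contain statement indicators"),
    ("assertion", "Assertion format declared but question doesn't contain assertion/reason indicators"),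
    ("table", "Table format declared but question doesn't contain table indicators") ]

-- Transliteration of B: one pass over pvFlat building the satisfied-formats set,
-- then paragraph length check, then a membership test of the declared format.
def validate_question_format_alt (question : List (String × String)) : Bool × Option String :=
  let text := PySem.Str.lower ((PySem.Dict.mk question).getD "question" "")
  let fmt := PySem.Str.lower ((PySem.Dict.mk question).getD "format" "single")
  let satisfied : PySem.Set String :=
    PySem.Set.ofList ((pvFlat.filter (fun p => PySem.Str.isIn p.2 text)).map Prod.fst)
  if fmt == "paragraph" then
    if PySem.Str.len text < 100 then
      (false, some "Paragraph format declared but question seems too short")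
    else (true, none)
  else
    match pvMsgs.get? fmt with
    | some msg =>
        if pvMsgs.contains fmt && !(PySem.Set.contains satisfied fmt) then (false, some msg)
        else (true, none)
    | none => (true, none)

-- ===== PRECONDITION & SPEC =====
def Spec_validate_question_format (question : List (String × String)) (out : Bool × Option String) : Prop := out = validate_question_format_alt question
instance (question : List (String × String)) (out : Bool × Option String) : Decidable (Spec_validate_question_format question out) := by unfold Spec_validate_question_format; infer_instance

-- ===== CLAIM =====
def Claim_equal_validate_question_format : Prop := ∀ (question : List (String × String)), Dom_validate_question_format question → Spec_validate_question_format question (validate_question_format question)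

-- ===== LEMMAS AND PROOFS =====
-- join of a one-element list is that element ('; '.join([w]) = w)
theorem pv_join_one (s : String) : PySem.Str.join "; " [s] = s := by
  simp [PySem.Str.join]

-- Set.contains of ofList is list contains
theorem pv_contains_ofList (xs : List String) (x : String) :
    PySem.Set.contains (PySem.Set.ofList xs) x = xs.contains x := by
  rw [Bool.eq_iff_iff]
  simp [PySem.Set.contains, PySem.Set.mem_ofList]

-- contains of the projected filtered table = any over the table
theorem pv_contains_filter (xs : List (String × String)) (pred : String → Bool) (fmt : String) :
    ((xs.filter (fun p => pred p.2)).map Prod.fst).contains fmt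
      = xs.any (fun p => p.1 == fmt && pred p.2) := by
  induction xs with
  | nil => rfl
  | cons h t ih =>
    rw [List.filter_cons]
    by_cases hp : pred h.2 = true
    · rw [if_pos hp, List.map_cons, List.contains_cons, ih, List.any_cons, hp]
      simp [BEq.comm]
    · rw [if_neg hp, ih, List.any_cons]
      simp [hp]

-- membership of a format in B's satisfied set = disjunction of its keywords' hits
theorem pv_sat (text fmt : String) :
    PySem.Set.contains
      (PySem.Set.ofList ((pvFlat.filter (fun p => PySem.Str.isIn p.2 text)).map Prod.fst)) fmt
      = pvFlat.any (fun p => p.1 == fmt && PySem.Str.isIn p.2 text) := by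
  rw [pv_contains_ofList]
  exact pv_contains_filter pvFlat (fun k => PySem.Str.isIn k text) fmt

theorem validate_question_format_spec : Claim_equal_validate_question_format := by
  intro question _
  unfold Spec_validate_question_format
  simp only [validate_question_format, validate_question_format_alt]
  generalize PySem.Str.lower ((PySem.Dict.mk question).getD "question" "") = text
  generalize PySem.Str.lower ((PySem.Dict.mk question).getD "format" "single") = fmt
  rw [pv_sat]
  by_cases h5 : fmt = "paragraph"
  · subst h5
    simp only [beq_self_eq_true, if_true, String.reduceBEq, Bool.false_eq_true, if_false, ne_eq]
    split_ifs <;> simp_all [pv_join_one]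
  have e5 : (fmt == "paragraph") = false := by simp [h5]
  by_cases h1 : fmt = "match"
  · subst h1
    simp only [pvMsgs, pvFlat, PySem.Dict.get?, PySem.Dict.contains, beq_self_eq_true, if_true,
      String.reduceBEq, Bool.false_eq_true, if_false, List.any_cons, List.any_nil, ne_eq]
    split_ifs <;> simp_all [pv_join_one]
  by_cases h2 : fmt = "statement"
  · subst h2
    simp only [pvMsgs, pvFlat, PySem.Dict.get?, PySem.Dict.contains, beq_self_eq_true, if_true,
      String.reduceBEq, Bool.false_eq_true, if_false, List.any_cons, List.any_nil, ne_eq]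
    split_ifs <;> simp_all [pv_join_one]
  by_cases h3 : fmt = "assertion"
  · subst h3
    simp only [pvMsgs, pvFlat, PySem.Dict.get?, PySem.Dict.contains, beq_self_eq_true, if_true,
      String.reduceBEq, Bool.false_eq_true, if_false, List.any_cons, List.any_nil, ne_eq]
    split_ifs <;> simp_all [pv_join_one]
  by_cases h4 : fmt = "table"
  · subst h4
    simp only [pvMsgs, pvFlat, PySem.Dict.get?, PySem.Dict.contains, beq_self_eq_true, if_true,
      String.reduceBEq, Bool.false_eq_true, if_false, List.any_cons, List.any_nil, ne_eq]
    split_ifs <;> simp_all [pv_join_one, Bool.and_assoc]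
  have e1 : (fmt == "match") = false := by simp [h1]
  have e2 : (fmt == "statement") = false := by simp [h2]
  have e3 : (fmt == "assertion") = false := by simp [h3]
  have e4 : (fmt == "table") = false := by simp [h4]
  have f1 : (("match" : String) == fmt) = false := by simp [Ne.symm h1]
  have f2 : (("statement" : String) == fmt) = false := by simp [Ne.symm h2]
  have f3 : (("assertion" : String) == fmt) = false := by simp [Ne.symm h3]
  have f4 : (("table" : String) == fmt) = false := by simp [Ne.symm h4]
  simp [pvMsgs, PySem.Dict.get?, e1, e2, e3, e4, e5, f1, f2, f3, f4]
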